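-- pv_equiv track=rewrite | github.com/JustaJunk/Drift-Stock | goldenFutures.py | mostDataInRange
-- ===== SOURCE A (Python) =====
-- def mostDataInRange(prices, levels):
-- 	rangeNum = len(levels)
-- 	counts = [0]*(rangeNum-1)
-- 	for pri in prices:
-- 		for i in range(rangeNum-1):
-- 			if pri >= levels[i] and pri < levels[i+1]:
-- 				counts[i] += 1
--
-- 	return counts.index(max(counts))
-- ===== SOURCE B (Python) =====
-- def mostDataInRange(prices, levels):
--     # Sort prices once, then count each bin by two binary searches:
--     # #(lo <= p < hi) = bisect_left(sp, hi) - bisect_left(sp, lo), clipped at 0.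
--     sp = sorted(prices)
--
--     def bl(x):
--         lo, hi = 0, len(sp)
--         while lo < hi:
--             mid = (lo + hi) // 2
--             if sp[mid] < x:
--                 lo = mid + 1
--             else:
--                 hi = mid
--         return lo
--
--     edges = [bl(v) for v in levels]
--     counts = [max(0, edges[i + 1] - edges[i]) for i in range(len(levels) - 1)]
--     return counts.index(max(counts))
-- ===== Notes on version B (the rewrite author's own statement) =====
-- stated objective: faster
-- what changed: Instead of testing every price against every bin (nested loops), B sorts the prices once and counts each bin as the clipped difference of two hand-written binary searches (bisect_left) at the bin's boundary levels.
import Mathlib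
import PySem

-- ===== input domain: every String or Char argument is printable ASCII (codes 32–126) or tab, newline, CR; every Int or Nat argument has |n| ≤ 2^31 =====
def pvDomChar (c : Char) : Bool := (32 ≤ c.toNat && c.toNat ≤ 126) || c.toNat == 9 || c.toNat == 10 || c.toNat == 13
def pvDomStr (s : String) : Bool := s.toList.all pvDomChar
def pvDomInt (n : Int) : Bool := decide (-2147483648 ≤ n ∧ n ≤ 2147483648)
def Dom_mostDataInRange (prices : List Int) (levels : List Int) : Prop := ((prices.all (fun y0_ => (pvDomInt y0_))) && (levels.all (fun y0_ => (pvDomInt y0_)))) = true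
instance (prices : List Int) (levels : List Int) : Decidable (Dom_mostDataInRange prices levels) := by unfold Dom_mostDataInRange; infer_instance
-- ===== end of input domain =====

-- B counts each bin by two binary searches on the once-sorted prices instead of A's nested scan; equivalence of the returned index is proved on all inputs with at least two levels.

-- ===== PORT A =====
-- literal port of A: nested loops incrementing counts, then counts.index(max(counts)).
-- levels[i] / levels[i+1] and counts[i] are read with getD: the indices come from
-- range(rangeNum-1) so they are always in range, where getD equals Python indexing.
def mostDataInRange (prices : List Int) (levels : List Int) : Int :=
  let rangeNum : Nat := levels.length
  let counts0 : List Int := List.replicate (rangeNum - 1) 0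
  let counts : List Int := prices.foldl (fun cs pri =>
      (List.range (rangeNum - 1)).foldl (fun cs i =>
        if levels.getD i 0 ≤ pri ∧ pri < levels.getD (i + 1) 0 then
          cs.set i (cs.getD i 0 + 1)
        else cs) cs) counts0
  match PySem.List.max? counts id with
  | none => 0  -- Python raises ValueError here (max of empty list); excluded by Pre_
  | some m =>
    match PySem.List.index? counts m with
    | some j => (j : Int)
    | none => 0  -- unreachable: max is a member

-- ===== PORT B =====
-- hand-written bisect_left from Source B: while lo < hi: mid = (lo+hi)//2; ...
-- sp[mid] is read with getD: mid is always in range when hi ≤ len sp, where getD equals Python indexing.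
def blBAux (a : List Int) (x : Int) (lo hi : Nat) : Nat :=
  if _h : lo < hi then
    let mid := (lo + hi) / 2
    if a.getD mid 0 < x then blBAux a x (mid + 1) hi else blBAux a x lo mid
  else lo
termination_by hi - lo
decreasing_by all_goals omega

def blB (a : List Int) (x : Int) : Nat := blBAux a x 0 a.length

def mostDataInRange_alt (prices : List Int) (levels : List Int) : Int :=
  let sp : List Int := PySem.List.sorted prices id
  let edges : List Nat := levels.map (fun v => blB sp v)
  let counts : List Int := (List.range (levels.length - 1)).map (fun i =>
      max 0 ((edges.getD (i + 1) 0 : Int) - (edges.getD i 0 : Int)))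
  match PySem.List.max? counts id with
  | none => 0
  | some m =>
    match PySem.List.index? counts m with
    | some j => (j : Int)
    | none => 0

-- ===== PRECONDITION & SPEC =====
-- Pre_ excludes exactly the inputs where Python A raises: with fewer than two levels
-- counts is empty and max(counts) raises ValueError.
def Pre_mostDataInRange (prices : List Int) (levels : List Int) : Prop := 2 ≤ levels.length
instance (prices : List Int) (levels : List Int) : Decidable (Pre_mostDataInRange prices levels) := by unfold Pre_mostDataInRange; infer_instance
def pvWitness_mostDataInRange : List Int × List Int := ([1, 3, 5], [0, 2, 6])

def Spec_mostDataInRange (prices : List Int) (levels : List Int) (out : Int) : Prop := out = mostDataInRange_alt prices levels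
instance (prices : List Int) (levels : List Int) (out : Int) : Decidable (Spec_mostDataInRange prices levels out) := by unfold Spec_mostDataInRange; infer_instance

-- ===== CLAIM (what is proved, stated in full; the proofs are below) =====
def Claim_equal_mostDataInRange : Prop := ∀ (prices : List Int) (levels : List Int), Dom_mostDataInRange prices levels → Pre_mostDataInRange prices levels → Spec_mostDataInRange prices levels (mostDataInRange prices levels)

-- ===== LEMMAS AND PROOFS =====

-- if every index below lo satisfies (< x) and no other does, countP counts exactly lo elements
lemma countP_lt_of_char (a : List Int) (x : Int) (lo : Nat) (hlo : lo ≤ a.length)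
    (h : ∀ j, j < a.length → (a.getD j 0 < x ↔ j < lo)) :
    a.countP (fun y => decide (y < x)) = lo := by
  induction a generalizing lo with
  | nil => simp at hlo; simp [hlo]
  | cons b t ih =>
    cases lo with
    | zero =>
      have hb : ¬ b < x := by have := (h 0 (by simp)).mp; simpa using fun hb => Nat.not_lt_zero 0 (this hb)
      have ht : t.countP (fun y => decide (y < x)) = 0 := by
        apply ih 0 (by omega)
        intro j hj
        have := h (j + 1) (by simpa using Nat.succ_lt_succ hj)
        simpa using this
      simp [hb, ht]
    | succ k =>
      have hb : b < x := by
        have := (h 0 (by simp)).mpr (Nat.succ_pos k)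
        simpa using this
      have ht : t.countP (fun y => decide (y < x)) = k := by
        apply ih k (by simpa using hlo)
        intro j hj
        have := h (j + 1) (by simpa using Nat.succ_lt_succ hj)
        simpa [Nat.succ_lt_succ_iff] using this
      simp [hb, ht]

lemma blBAux_eq_countP (a : List Int) (x : Int)
    (hs : List.Pairwise (· ≤ ·) a) :
    ∀ n lo hi, n = hi - lo → hi ≤ a.length → lo ≤ hi →
      (∀ j, j < lo → a.getD j 0 < x) →
      (∀ j, hi ≤ j → j < a.length → ¬ a.getD j 0 < x) →
      blBAux a x lo hi = a.countP (fun y => decide (y < x)) := by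
  intro n
  induction n using Nat.strong_induction_on with
  | _ n ih =>
    intro lo hi hn hhi hlohi hlow hhigh
    rw [blBAux]
    by_cases hlt : lo < hi
    · rw [dif_pos hlt]
      have hmidlt : (lo + hi) / 2 < hi := by omega
      have hmidge : lo ≤ (lo + hi) / 2 := by omega
      have hmidlen : (lo + hi) / 2 < a.length := by omega
      have hpair := List.pairwise_iff_getElem.mp hs
      show (if a.getD ((lo + hi) / 2) 0 < x then blBAux a x ((lo + hi) / 2 + 1) hi
            else blBAux a x lo ((lo + hi) / 2)) = List.countP (fun y => decide (y < x)) a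
      set mid := (lo + hi) / 2 with hmid
      by_cases hcmp : a.getD mid 0 < x
      · rw [if_pos hcmp]
        apply ih (hi - (mid + 1)) (by omega) (mid + 1) hi rfl hhi (by omega)
        · intro j hj
          rcases Nat.lt_or_ge j mid with hjm | hjm
          · have hjlen : j < a.length := by omega
            have : a[j] ≤ a[mid] := hpair j mid hjlen hmidlen hjm
            rw [List.getD_eq_getElem a 0 hjlen]
            rw [List.getD_eq_getElem a 0 hmidlen] at hcmp
            omega
          · have : j = mid := by omega
            subst this; exact hcmp
        · exact hhigh
      · rw [if_neg hcmp]
        apply ih (mid - lo) (by omega) lo mid rfl (by omega) (by omega) hlow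
        intro j hj hjlen
        have : a[mid] ≤ a[j] := by
          rcases Nat.lt_or_ge mid j with hmj | hmj
          · exact hpair mid j hmidlen hjlen hmj
          · have : mid = j := by omega
            subst this; rfl
        rw [List.getD_eq_getElem a 0 hjlen]
        rw [List.getD_eq_getElem a 0 hmidlen] at hcmp
        omega
    · rw [dif_neg hlt]
      have hlohi' : lo = hi := by omega
      subst hlohi'
      exact (countP_lt_of_char a x lo (by omega) (by
        intro j hj
        constructor
        · intro hlt
          by_contra hge2
          exact hhigh j (by omega) hj hlt
        · intro hjlo; exact hlow j hjlo)).symm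

-- blB on the sorted copy counts the prices below x
lemma blB_sorted_eq_countP (prices : List Int) (x : Int) :
    blB (PySem.List.sorted prices id) x = prices.countP (fun y => decide (y < x)) := by
  have hs : List.Pairwise (· ≤ ·) (PySem.List.sorted prices id) := by
    simpa using PySem.List.sorted_pairwise prices id
  have hperm : (PySem.List.sorted prices id).Perm prices := by
    exact PySem.List.sorted_perm prices id false
  rw [blB, blBAux_eq_countP _ x hs ((PySem.List.sorted prices id).length - 0) 0
      (PySem.List.sorted prices id).length rfl (le_refl _) (by omega)
      (by intro j hj; omega) (by intro j hj hjl; omega)]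
  exact hperm.countP_eq _

-- splitting the below-count at the lower boundary (lo ≤ hi)
lemma count_split (ps : List Int) (lo hi : Int) (h : lo ≤ hi) :
    ps.countP (fun y => decide (y < hi))
      = ps.countP (fun y => decide (y < lo)) + ps.countP (fun y => decide (lo ≤ y ∧ y < hi)) := by
  induction ps with
  | nil => simp
  | cons p t ih =>
    rw [List.countP_cons, List.countP_cons, List.countP_cons, ih]
    simp only [decide_eq_true_eq]
    split_ifs <;> omega

-- clipped difference of below-counts = count of the half-open bin
lemma clip_diff_eq_bin (ps : List Int) (lo hi : Int) :
    max 0 ((ps.countP (fun y => decide (y < hi)) : Int) - (ps.countP (fun y => decide (y < lo)) : Int))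
      = (ps.countP (fun y => decide (lo ≤ y ∧ y < hi)) : Int) := by
  by_cases hle : lo ≤ hi
  · rw [count_split ps lo hi hle]
    push_cast
    omega
  · have hz : ps.countP (fun y => decide (lo ≤ y ∧ y < hi)) = 0 := by
      rw [List.countP_eq_zero]; intro y _; simp; omega
    have hmono : ps.countP (fun y => decide (y < hi)) ≤ ps.countP (fun y => decide (y < lo)) := by
      apply List.countP_mono_left; intro y _; simp; omega
    rw [hz]
    simp only [Nat.cast_zero]
    omega

-- the bin predicate of bin i
def binPred (levels : List Int) (i : Nat) (p : Int) : Bool :=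
  decide (levels.getD i 0 ≤ p ∧ p < levels.getD (i + 1) 0)

-- one pass of A's inner loop, entrywise
lemma inner_loop_getD (levels : List Int) (pri : Int) (n : Nat) (cs : List Int) (hn : n ≤ cs.length) :
    ((List.range n).foldl (fun cs i =>
        if levels.getD i 0 ≤ pri ∧ pri < levels.getD (i + 1) 0 then
          cs.set i (cs.getD i 0 + 1)
        else cs) cs).length = cs.length ∧
    ∀ j, ((List.range n).foldl (fun cs i =>
        if levels.getD i 0 ≤ pri ∧ pri < levels.getD (i + 1) 0 then
          cs.set i (cs.getD i 0 + 1)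
        else cs) cs).getD j 0
      = cs.getD j 0 + (if j < n ∧ binPred levels j pri then 1 else 0) := by
  induction n with
  | zero => simp
  | succ m ih =>
    obtain ⟨ihlen, ihget⟩ := ih (by omega)
    rw [List.range_succ, List.foldl_append, List.foldl_cons, List.foldl_nil]
    constructor
    · split
      · rw [List.length_set]; exact ihlen
      · exact ihlen
    · intro j
      by_cases hb : binPred levels m pri
      · have hb' : levels.getD m 0 ≤ pri ∧ pri < levels.getD (m + 1) 0 := by
          simpa [binPred] using hb
        rw [if_pos hb']
        by_cases hjm : j = m
        · subst hjm
          have hjF : j < (((List.range j).foldl (fun cs i =>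
              if levels.getD i 0 ≤ pri ∧ pri < levels.getD (i + 1) 0 then
                cs.set i (cs.getD i 0 + 1) else cs) cs)).length := by
            rw [ihlen]; omega
          rw [List.getD_eq_getElem _ 0 (by simpa using hjF), List.getElem_set_self, ihget j]
          simp [hb]
        · rw [List.getD_eq_getElem?_getD, List.getElem?_set_ne (by omega),
              ← List.getD_eq_getElem?_getD, ihget j]
          have heq : (j < m ∧ binPred levels j pri) ↔ (j < m + 1 ∧ binPred levels j pri) := by
            constructor <;> rintro ⟨h1, h2⟩ <;> exact ⟨by omega, h2⟩
          simp only [heq]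
      · have hb' : ¬ (levels.getD m 0 ≤ pri ∧ pri < levels.getD (m + 1) 0) := by
          simpa [binPred] using hb
        rw [if_neg hb', ihget j]
        congr 1
        by_cases hjm : j = m
        · subst hjm; simp [hb]
        · have heq : (j < m ∧ binPred levels j pri) ↔ (j < m + 1 ∧ binPred levels j pri) := by
            constructor <;> rintro ⟨h1, h2⟩ <;> exact ⟨by omega, h2⟩
          simp only [heq]

-- the inner loop maps a range-map to a range-map with the bin indicator added
lemma inner_loop_map (levels : List Int) (pri : Int) (n : Nat) (f : Nat → Int) :
    (List.range n).foldl (fun cs i =>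
        if levels.getD i 0 ≤ pri ∧ pri < levels.getD (i + 1) 0 then
          cs.set i (cs.getD i 0 + 1)
        else cs) ((List.range n).map f)
      = (List.range n).map (fun i => f i + (if binPred levels i pri then 1 else 0)) := by
  obtain ⟨hlen, hget⟩ := inner_loop_getD levels pri n ((List.range n).map f) (by simp)
  apply List.ext_getElem
  · rw [hlen]; simp
  · intro j h1 h2
    have hjn : j < n := by simpa using h2
    rw [← List.getD_eq_getElem _ 0 h1, hget j, List.getElem_map, List.getElem_range]
    rw [List.getD_eq_getElem _ 0 (by simpa using hjn), List.getElem_map, List.getElem_range]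
    simp [hjn]

-- A's whole counting phase, characterised as per-bin countP
lemma outer_loop_char (ps : List Int) (levels : List Int) (n : Nat) (f : Nat → Int) :
    ps.foldl (fun cs pri =>
      (List.range n).foldl (fun cs i =>
        if levels.getD i 0 ≤ pri ∧ pri < levels.getD (i + 1) 0 then
          cs.set i (cs.getD i 0 + 1)
        else cs) cs) ((List.range n).map f)
    = (List.range n).map (fun i => f i + (ps.countP (binPred levels i) : Int)) := by
  induction ps generalizing f with
  | nil => simp
  | cons p t ih =>
    rw [List.foldl_cons, inner_loop_map, ih]
    apply List.map_congr_left
    intro i _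
    rw [List.countP_cons]
    by_cases h : binPred levels i p <;> simp [h] <;> ring

-- the two counts lists are equal
lemma counts_eq (prices : List Int) (levels : List Int) :
    (prices.foldl (fun cs pri =>
      (List.range (levels.length - 1)).foldl (fun cs i =>
        if levels.getD i 0 ≤ pri ∧ pri < levels.getD (i + 1) 0 then
          cs.set i (cs.getD i 0 + 1)
        else cs) cs) (List.replicate (levels.length - 1) (0 : Int)))
    = (List.range (levels.length - 1)).map (fun i =>
        max 0 (((levels.map (fun v => blB (PySem.List.sorted prices id) v)).getD (i + 1) 0 : Int)
              - ((levels.map (fun v => blB (PySem.List.sorted prices id) v)).getD i 0 : Int))) := by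
  have hrepl : List.replicate (levels.length - 1) (0 : Int)
      = (List.range (levels.length - 1)).map (fun _ => 0) := by
    simp [List.map_const']
  rw [hrepl, outer_loop_char]
  apply List.map_congr_left
  intro i hi
  have hin : i < levels.length - 1 := List.mem_range.mp hi
  have h1 : i < levels.length := by omega
  have h2 : i + 1 < levels.length := by omega
  rw [List.getD_eq_getElem _ 0 (by simpa using h2), List.getD_eq_getElem _ 0 (by simpa using h1)]
  simp only [List.getElem_map]
  rw [blB_sorted_eq_countP, blB_sorted_eq_countP, clip_diff_eq_bin]
  simp only [zero_add, Nat.cast_inj]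
  apply List.countP_congr
  intro y _
  simp [binPred, List.getElem?_eq_getElem h1, List.getElem?_eq_getElem h2]

-- ===== VERDICT (by name: the statement is the Claim_ definition above) =====
theorem mostDataInRange_spec : Claim_equal_mostDataInRange := by
  intro prices levels _ _
  unfold Spec_mostDataInRange
  simp only [mostDataInRange, mostDataInRange_alt]
  rw [counts_eq]
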